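-- pv_equiv track=rewrite | github.com/pavlokach/battleship | lab1.py | ship_size
-- ===== SOURCE A (Python) =====
-- import string
--
-- alphabet = string.ascii_uppercase
--
-- def ship_size(data, coords):
--     ver, hor = False, False
--     size = 1
--     fine = []
--     stars = data[0] + data[1]
--     coords = list(coords)
--     for star in stars:
--         if star[0] == coords[0] or star[1] == coords[1]:
--             fine.append(star)
--     if (coords[0], coords[1] + 1) in fine \
--        or (coords[0], coords[1] - 1) in fine:
--         ver = True
--     else:
--         hor = True
--     if ver is True:
--         num = coords[1]
--         while (coords[0], num) in fine:
--             size += 1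
--             num += 1
--         num = coords[1]
--         while (coords[0], num) in fine:
--             size += 1
--             num -= 1
--         return size - 2
--     elif hor is True:
--         num = coords[0]
--         while (num, coords[1]) in fine:
--             size += 1
--             num = alphabet[alphabet.index(num) + 1]
--         num = coords[0]
--         while (num, coords[1]) in fine:
--             size += 1
--             num = alphabet[alphabet.index(num) - 1]
--         return size - 2
-- ===== SOURCE B (Python) =====
-- import string
--
-- alphabet = string.ascii_uppercase
--
-- def ship_size(data, coords):
--     letter, col = coords
--     occupied = set(data[0] + data[1])
--     if (letter, col + 1) in occupied or (letter, col - 1) in occupied: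
--         # vertical ship: the axis positions are the occupied column numbers of this row
--         axis = {c for r, c in occupied if r == letter}
--         x = col
--     else:
--         # horizontal ship: the axis positions are the alphabet indices of the board
--         # rows occupied in this column
--         board = set(alphabet)
--         axis = {alphabet.index(r) for r, c in occupied if c == col and r in board}
--         if letter not in board:
--             return -1
--         x = alphabet.index(letter)
--     def linked(c):
--         return all(k in axis for k in range(min(c, x), max(c, x) + 1))
--     above = sum(1 for c in axis if c >= x and linked(c))
--     below = sum(1 for c in axis if c <= x and linked(c))
--     return above + below - 1
-- ===== Notes on version B (the rewrite author's own statement) =====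
-- stated objective: alternative
-- what changed: B replaces A's four outward cell-by-cell while-loop walks with a set-based connectivity count: it maps the aligned occupied cells to integer axis positions (column numbers, or alphabet indices of the rows) and counts, over the occupied set, the cells whose whole interval to the queried position is occupied.
-- intended difference: On horizontal queries where A's alphabet arithmetic strays off the board - a run reaching row 'A' with row 'Z' also occupied (negative index wraps around) or a multi-character occupied row label that alphabet.index matches as a substring - A returns a count inflated by the stray cells, while B returns the true linear run length through the given row, which is the intended ship size. — e.g. on ship_size([[("A", 0)], [("Z", 0)]], ("A", 0)): A returns 2, B returns 1
import Mathlib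
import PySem

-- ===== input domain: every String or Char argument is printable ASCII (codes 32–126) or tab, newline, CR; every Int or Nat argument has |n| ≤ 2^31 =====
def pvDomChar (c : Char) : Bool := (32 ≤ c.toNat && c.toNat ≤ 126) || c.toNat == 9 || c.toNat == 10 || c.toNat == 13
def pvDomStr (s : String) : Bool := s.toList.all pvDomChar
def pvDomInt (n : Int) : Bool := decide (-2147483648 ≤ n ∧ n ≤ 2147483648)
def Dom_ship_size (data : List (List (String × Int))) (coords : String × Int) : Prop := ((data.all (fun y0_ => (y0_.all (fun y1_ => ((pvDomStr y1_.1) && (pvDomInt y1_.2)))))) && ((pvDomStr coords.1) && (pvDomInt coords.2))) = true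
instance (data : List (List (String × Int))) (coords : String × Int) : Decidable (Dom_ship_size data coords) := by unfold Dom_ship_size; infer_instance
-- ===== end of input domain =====

-- B replaces A's four outward while-loop walks by a set-based connectivity count over
-- integer axis positions (a different algorithm, similar cost); where A's letter
-- arithmetic strays off the board (wraparound below 'A', substring row labels) B
-- returns the linear run length instead — see D_ship_size.

-- `alphabet` = string.ascii_uppercase
def pvAlphabet : String := "ABCDEFGHIJKLMNOPQRSTUVWXYZ"

-- `alphabet[i]` as a 1-character string ("" on IndexError; those inputs are outside Pre_)
def pvLetter (i : Int) : String :=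
  match PySem.Str.pyGet? pvAlphabet i with
  | some c => String.ofList [c]
  | none => ""

-- ===== PORT A =====
-- `while (coords[0], num) in fine: size += 1; num += 1`
def aVerUp (fine : List (String × Int)) (s : String) : Nat → Int → Int → Int
  | 0, _, size => size
  | f + 1, num, size =>
    if (s, num) ∈ fine then aVerUp fine s f (num + 1) (size + 1) else size

-- `while (coords[0], num) in fine: size += 1; num -= 1`
def aVerDown (fine : List (String × Int)) (s : String) : Nat → Int → Int → Int
  | 0, _, size => size
  | f + 1, num, size =>
    if (s, num) ∈ fine then aVerDown fine s f (num - 1) (size + 1) else size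

-- `while (num, coords[1]) in fine: size += 1; num = alphabet[alphabet.index(num) + 1]`
def aHorUp (fine : List (String × Int)) (col : Int) : Nat → String → Int → Int
  | 0, _, size => size
  | f + 1, num, size =>
    if (num, col) ∈ fine then
      aHorUp fine col f (pvLetter (PySem.Str.find pvAlphabet num + 1)) (size + 1)
    else size

-- `while (num, coords[1]) in fine: size += 1; num = alphabet[alphabet.index(num) - 1]`
def aHorDown (fine : List (String × Int)) (col : Int) : Nat → String → Int → Int
  | 0, _, size => size
  | f + 1, num, size =>
    if (num, col) ∈ fine then
      aHorDown fine col f (pvLetter (PySem.Str.find pvAlphabet num - 1)) (size + 1)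
    else size

-- fuel `stars.length + 60` covers every loop that terminates in Python on Pre_ inputs
def ship_size (data : List (List (String × Int))) (coords : String × Int) : Int :=
  let d0 := (PySem.List.pyGet? data 0).getD []
  let d1 := (PySem.List.pyGet? data 1).getD []
  let stars := d0 ++ d1
  let s := coords.1
  let col := coords.2
  let fine := stars.foldl
    (fun acc star => if star.1 = s ∨ star.2 = col then acc ++ [star] else acc) []
  let fuel := stars.length + 60
  if (s, col + 1) ∈ fine ∨ (s, col - 1) ∈ fine then
    aVerDown fine s fuel col (aVerUp fine s fuel col 1) - 2
  else
    aHorDown fine col fuel s (aHorUp fine col fuel s 1) - 2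

-- ===== PORT B =====
-- `board = set(alphabet)`
def bBoard : List String := PySem.Set.ofList (pvAlphabet.toList.map (fun ch => String.ofList [ch]))

-- `linked = lambda c: all(k in axis for k in range(min(c, x), max(c, x) + 1))`
def bLinked (axis : List Int) (x c : Int) : Bool :=
  (PySem.List.pyRange (min c x) (max c x + 1) 1).all (fun k => decide (k ∈ axis))

-- `above = sum(…); below = sum(…); return above + below - 1`
def bTail (axis : List Int) (x : Int) : Int :=
  let above := axis.foldl (fun n c => if x ≤ c ∧ bLinked axis x c = true then n + 1 else n) (0 : Int)
  let below := axis.foldl (fun n c => if c ≤ x ∧ bLinked axis x c = true then n + 1 else n) (0 : Int)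
  above + below - 1

def ship_size_alt (data : List (List (String × Int))) (coords : String × Int) : Int :=
  let letter := coords.1
  let col := coords.2
  let occupied : List (String × Int) :=
    PySem.Set.ofList ((PySem.List.pyGet? data 0).getD [] ++ (PySem.List.pyGet? data 1).getD [])
  if (letter, col + 1) ∈ occupied ∨ (letter, col - 1) ∈ occupied then
    bTail (PySem.Set.ofList ((occupied.filter (fun rc => rc.1 == letter)).map (fun rc => rc.2))) col
  else
    let axis := PySem.Set.ofList (occupied.filterMap (fun rc =>
      if rc.2 = col ∧ rc.1 ∈ bBoard then some (PySem.Str.find pvAlphabet rc.1) else none))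
    if letter ∈ bBoard then bTail axis (PySem.Str.find pvAlphabet letter) else -1

-- ===== PRECONDITION & SPEC =====
-- Pre_ excludes exactly the inputs on which Python A raises: fewer than two rows in
-- `data` (IndexError), and the horizontal case where the walk's letter arithmetic fails —
-- coords[0] occupied but not a substring of the alphabet (ValueError), or the occupied
-- run above coords[0] reaching 'Z' unbroken (IndexError past 'Z' / the resulting
-- wraparound cycle). Both programs raise there; no input on which A returns is excluded.
def Pre_ship_size (data : List (List (String × Int))) (coords : String × Int) : Prop :=
  2 ≤ data.length ∧
  (let stars := (PySem.List.pyGet? data 0).getD [] ++ (PySem.List.pyGet? data 1).getD []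
   ((coords.1, coords.2 + 1) ∈ stars ∨ (coords.1, coords.2 - 1) ∈ stars) ∨
   (coords.1, coords.2) ∉ stars ∨
   (0 ≤ PySem.Str.find pvAlphabet coords.1 ∧
    ∃ j ∈ List.range 26, PySem.Str.find pvAlphabet coords.1 < (j : Int) ∧
      (pvLetter (j : Int), coords.2) ∉ stars))
instance (data : List (List (String × Int))) (coords : String × Int) : Decidable (Pre_ship_size data coords) := by unfold Pre_ship_size; infer_instance

def pvWitness_ship_size : (List (List (String × Int))) × (String × Int) :=
  ([[("A", 1)], [("A", 2)]], ("A", 1))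

-- On horizontal queries where A's alphabet arithmetic strays off the board — a run
-- reaching row 'A' with row 'Z' also occupied (the negative index wraps around), or a
-- multi-character occupied row label that alphabet.index matches as a substring — A
-- returns a count inflated by the stray cells, while B returns the true linear run
-- length through the given row, which is the intended ship size.
def D_ship_size (data : List (List (String × Int))) (coords : String × Int) : Prop :=
  let stars := (PySem.List.pyGet? data 0).getD [] ++ (PySem.List.pyGet? data 1).getD []
  ¬ ((coords.1, coords.2 + 1) ∈ stars ∨ (coords.1, coords.2 - 1) ∈ stars) ∧
  0 ≤ PySem.Str.find pvAlphabet coords.1 ∧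
  ((PySem.Str.len coords.1 ≠ 1 ∧ (coords.1, coords.2) ∈ stars) ∨
   (PySem.Str.len coords.1 = 1 ∧
    (∀ k ∈ List.range 26, (k : Int) ≤ PySem.Str.find pvAlphabet coords.1 →
      (pvLetter (k : Int), coords.2) ∈ stars) ∧
    (pvLetter 25, coords.2) ∈ stars))
instance (data : List (List (String × Int))) (coords : String × Int) : Decidable (D_ship_size data coords) := by unfold D_ship_size; infer_instance

def Spec_ship_size (data : List (List (String × Int))) (coords : String × Int) (out : Int) : Prop := ¬ D_ship_size data coords → out = ship_size_alt data coords
instance (data : List (List (String × Int))) (coords : String × Int) (out : Int) : Decidable (Spec_ship_size data coords out) := by unfold Spec_ship_size; infer_instance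

def pvDiffWitness_ship_size : (List (List (String × Int))) × (String × Int) :=
  ([[("A", 0)], [("Z", 0)]], ("A", 0))

def pvDiffWitnessOut_ship_size : Int × Int := (2, 1)

-- ===== CLAIM (what is proved, stated in full; the proofs are below) =====
def Claim_unchanged_ship_size : Prop := ∀ (data : List (List (String × Int))) (coords : String × Int), Dom_ship_size data coords → Pre_ship_size data coords → Spec_ship_size data coords (ship_size data coords)
def Claim_changed_ship_size : Prop := Dom_ship_size (pvDiffWitness_ship_size.1) (pvDiffWitness_ship_size.2) ∧ Pre_ship_size (pvDiffWitness_ship_size.1) (pvDiffWitness_ship_size.2) ∧ D_ship_size (pvDiffWitness_ship_size.1) (pvDiffWitness_ship_size.2) ∧ ship_size (pvDiffWitness_ship_size.1) (pvDiffWitness_ship_size.2) = pvDiffWitnessOut_ship_size.1 ∧ ship_size_alt (pvDiffWitness_ship_size.1) (pvDiffWitness_ship_size.2) = pvDiffWitnessOut_ship_size.2 ∧ pvDiffWitnessOut_ship_size.1 ≠ pvDiffWitnessOut_ship_size.2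
def Claim_exact_ship_size : Prop := ∀ (data : List (List (String × Int))) (coords : String × Int), Dom_ship_size data coords → Pre_ship_size data coords → D_ship_size data coords → ship_size data coords ≠ ship_size_alt data coords

-- ===== LEMMAS AND PROOFS =====

theorem pvLetter_spec (j : Int) (h0 : 0 ≤ j) (h1 : j < 26) :
    ∃ c : Char, pvAlphabet.toList[j.toNat]? = some c ∧ pvLetter j = String.ofList [c] := by
  obtain ⟨k, rfl⟩ : ∃ k : Nat, j = (k : Int) := ⟨j.toNat, by omega⟩
  have hk : k < 26 := by omega
  have hlen : k < pvAlphabet.toList.length := by simp [pvAlphabet]; omega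
  refine ⟨pvAlphabet.toList[k], by simp, ?_⟩
  simp [pvLetter, PySem.List.pyGet?_natCast, List.getElem?_eq_getElem hlen]

theorem find_len_pvLetter : ∀ k ∈ List.range 26,
    PySem.Str.find pvAlphabet (pvLetter (k:Int)) = (k:Int) ∧ PySem.Str.len (pvLetter (k:Int)) = 1 := by decide

theorem find_pvLetter (j : Int) (h0 : 0 ≤ j) (h1 : j < 26) :
    PySem.Str.find pvAlphabet (pvLetter j) = j := by
  obtain ⟨k, rfl⟩ : ∃ k : Nat, j = (k : Int) := ⟨j.toNat, by omega⟩
  exact (find_len_pvLetter k (by simp; omega)).1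

theorem len_pvLetter (j : Int) (h0 : 0 ≤ j) (h1 : j < 26) :
    PySem.Str.len (pvLetter j) = 1 := by
  obtain ⟨k, rfl⟩ : ∃ k : Nat, j = (k : Int) := ⟨j.toNat, by omega⟩
  exact (find_len_pvLetter k (by simp; omega)).2

theorem bBoard_eq : bBoard = (List.range 26).map (fun k => pvLetter (k : Int)) := by decide

theorem mem_bBoard_iff (r : String) :
    r ∈ bBoard ↔ ∃ k : Nat, k < 26 ∧ r = pvLetter k := by
  rw [bBoard_eq]
  simp [List.mem_map, eq_comm]

-- a 1-character string with find ≥ 0 IS the alphabet letter at that index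
theorem eq_pvLetter_of_len_one (r : String) (hlen : PySem.Str.len r = 1)
    (hfind : 0 ≤ PySem.Str.find pvAlphabet r) :
    PySem.Str.find pvAlphabet r < 26 ∧ r = pvLetter (PySem.Str.find pvAlphabet r) := by
  obtain ⟨c, hc⟩ : ∃ c, r.toList = [c] := by
    have : r.toList.length = 1 := by simpa [PySem.Str.len_eq] using hlen
    exact List.length_eq_one_iff.mp this
  have hb : PySem.Str.find pvAlphabet r = PySem.Chars.find pvAlphabet.toList [c] := by
    simp [← hc]
  rw [hb] at hfind ⊢
  have hspec := (PySem.Chars.find_spec hfind).1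
  have hne : pvAlphabet.toList.drop (PySem.Chars.find pvAlphabet.toList [c]).toNat ≠ [] := by
    intro h; rw [h] at hspec; exact (List.cons_ne_nil _ _) (List.prefix_nil.mp hspec)
  have hlt : (PySem.Chars.find pvAlphabet.toList [c]).toNat < pvAlphabet.toList.length := by
    by_contra h; exact hne (List.drop_eq_nil_of_le (by omega))
  have hel : pvAlphabet.toList[(PySem.Chars.find pvAlphabet.toList [c]).toNat]'hlt = c := by
    obtain ⟨s', hs'⟩ := hspec
    have hdp : pvAlphabet.toList.drop (PySem.Chars.find pvAlphabet.toList [c]).toNat = c :: s' := by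
      rw [← hs']; rfl
    have h0 : (pvAlphabet.toList.drop (PySem.Chars.find pvAlphabet.toList [c]).toNat)[0]'(by simp [hdp]) = c := by
      simp [hdp]
    simpa [List.getElem_drop] using h0
  have hlt26 : (PySem.Chars.find pvAlphabet.toList [c]).toNat < 26 := by
    simpa [pvAlphabet] using hlt
  refine ⟨by omega, ?_⟩
  obtain ⟨c', hc1, hc2⟩ := pvLetter_spec (PySem.Chars.find pvAlphabet.toList [c]) hfind (by omega)
  rw [List.getElem?_eq_getElem hlt, hel] at hc1
  injection hc1 with hc1
  refine Eq.trans ?_ hc2.symm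
  rw [← hc1, ← hc, String.ofList_toList]

-- every cell the algorithm ever probes satisfies the filter, so `fine` membership is `stars` membership
theorem mem_fine_iff (stars : List (String × Int)) (s : String) (col : Int)
    (q : String × Int) (hq : q.1 = s ∨ q.2 = col) :
    (q ∈ stars.foldl
        (fun acc star => if star.1 = s ∨ star.2 = col then acc ++ [star] else acc) []
      ↔ q ∈ stars) := by
  rw [PySem.List.foldl_append_ite_eq_filter]
  simp only [List.nil_append, List.mem_filter, decide_eq_true_eq]
  exact ⟨fun h => h.1, fun h => ⟨h, hq⟩⟩

theorem mem_axisV (stars : List (String × Int)) (letter : String) (c : Int) :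
    c ∈ PySem.Set.ofList
        (((PySem.Set.ofList stars).filter (fun rc => rc.1 == letter)).map (fun rc => rc.2))
      ↔ (letter, c) ∈ stars := by
  rw [PySem.Set.mem_ofList]
  simp only [List.mem_map, List.mem_filter, beq_iff_eq]
  constructor
  · rintro ⟨⟨r, v⟩, ⟨hm, hr⟩, hv⟩
    simp only at hr hv; subst hr; subst hv
    exact (PySem.Set.mem_ofList _ _).mp hm
  · intro h
    exact ⟨(letter, c), ⟨(PySem.Set.mem_ofList _ _).mpr h, rfl⟩, rfl⟩

theorem mem_axisH (stars : List (String × Int)) (col j : Int) :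
    j ∈ PySem.Set.ofList ((PySem.Set.ofList stars).filterMap (fun rc =>
        if rc.2 = col ∧ rc.1 ∈ bBoard then some (PySem.Str.find pvAlphabet rc.1) else none))
      ↔ 0 ≤ j ∧ j < 26 ∧ (pvLetter j, col) ∈ stars := by
  rw [PySem.Set.mem_ofList]
  simp only [List.mem_filterMap]
  constructor
  · rintro ⟨⟨r, v⟩, hm, hif⟩
    by_cases hcond : v = col ∧ r ∈ bBoard
    · rw [if_pos (by simpa using hcond)] at hif
      injection hif with hif
      obtain ⟨k, hk26, rfl⟩ := (mem_bBoard_iff r).mp hcond.2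
      rw [find_pvLetter k (by omega) (by exact_mod_cast hk26)] at hif
      subst hif
      refine ⟨by omega, by exact_mod_cast hk26, ?_⟩
      rw [← hcond.1]
      exact (PySem.Set.mem_ofList _ _).mp hm
    · rw [if_neg (by simpa using hcond)] at hif; cases hif
  · rintro ⟨h0, h26, hmem⟩
    refine ⟨(pvLetter j, col), (PySem.Set.mem_ofList _ _).mpr hmem, ?_⟩
    have hbb : pvLetter j ∈ bBoard := (mem_bBoard_iff _).mpr ⟨j.toNat, by omega, by rw [show ((j.toNat : Nat) : Int) = j by omega]⟩
    rw [if_pos ⟨rfl, hbb⟩, find_pvLetter j h0 h26]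

-- pigeonhole: an injective Int sequence leaves any finite list within length+1 steps
theorem exists_shift_not_mem (axis : List Int) (f : Nat → Int)
    (hinj : Function.Injective f) : ∃ k : Nat, k ≤ axis.length ∧ f k ∉ axis := by
  by_contra h
  push_neg at h
  have hsub : (Finset.range (axis.length + 1)).image f ⊆ axis.toFinset := by
    intro y hy
    obtain ⟨k, hk, rfl⟩ := Finset.mem_image.mp hy
    exact List.mem_toFinset.mpr (h k (by simpa using Nat.lt_succ_iff.mp (Finset.mem_range.mp hk)))
  have h1 : axis.length + 1 ≤ axis.toFinset.card := by
    calc axis.length + 1 = ((Finset.range (axis.length + 1)).image f).card := by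
          rw [Finset.card_image_of_injective _ hinj, Finset.card_range]
      _ ≤ axis.toFinset.card := Finset.card_le_card hsub
  have h2 : axis.toFinset.card ≤ axis.length := axis.toFinset_card_le
  omega

theorem linked_iff (axis : List Int) (x c : Int) :
    bLinked axis x c = true ↔ ∀ k : Int, min c x ≤ k → k ≤ max c x → k ∈ axis := by
  simp only [bLinked, List.all_eq_true, PySem.List.mem_pyRange_one, decide_eq_true_eq]
  constructor
  · intro h k h1 h2; exact h k ⟨h1, by omega⟩
  · rintro h k ⟨h1, h2⟩; exact h k h1 (by omega)

-- B's `above` sum counts exactly the upward run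
theorem count_above (axis : List Int) (hnd : axis.Nodup) (x : Int) (u : Nat)
    (hu1 : ∀ k : Nat, k < u → x + k ∈ axis) (hu2 : x + u ∉ axis) :
    axis.foldl (fun n c => if x ≤ c ∧ bLinked axis x c = true then n + 1 else n) (0 : Int)
      = u := by
  rw [PySem.List.foldl_ite_add_one, zero_add]
  have hiff : ∀ c : Int, (c ∈ axis ∧ (x ≤ c ∧ bLinked axis x c = true)) ↔ (x ≤ c ∧ c ≤ x + u - 1) := by
    intro c
    constructor
    · rintro ⟨hmem, hxc, hlk⟩
      refine ⟨hxc, ?_⟩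
      by_contra hgt
      have : x + (u : Int) ∈ axis := by
        refine (linked_iff axis x c).mp hlk _ ?_ ?_ <;> omega
      exact hu2 this
    · rintro ⟨h1, h2⟩
      have hcm : c ∈ axis := by
        have := hu1 (c - x).toNat (by omega)
        rwa [show x + ((c - x).toNat : Int) = c by omega] at this
      refine ⟨hcm, h1, (linked_iff axis x c).mpr ?_⟩
      intro k hk1 hk2
      have := hu1 (k - x).toNat (by omega)
      rwa [show x + ((k - x).toNat : Int) = k by omega] at this
  have hfeq : (axis.filter (fun c => decide (x ≤ c ∧ bLinked axis x c = true))).toFinset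
      = Finset.Icc x (x + u - 1) := by
    ext c
    simp only [List.mem_toFinset, List.mem_filter, decide_eq_true_eq, Finset.mem_Icc]
    exact hiff c
  have hlen : (axis.filter (fun c => decide (x ≤ c ∧ bLinked axis x c = true))).length
      = (Finset.Icc x (x + (u:Int) - 1)).card := by
    rw [← hfeq, List.toFinset_card_of_nodup (hnd.filter _)]
  rw [List.countP_eq_length_filter, hlen, Int.card_Icc]
  omega

-- B's `below` sum counts exactly the downward run
theorem count_below (axis : List Int) (hnd : axis.Nodup) (x : Int) (d : Nat)
    (hd1 : ∀ k : Nat, k < d → x - k ∈ axis) (hd2 : x - d ∉ axis) :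
    axis.foldl (fun n c => if c ≤ x ∧ bLinked axis x c = true then n + 1 else n) (0 : Int)
      = d := by
  rw [PySem.List.foldl_ite_add_one, zero_add]
  have hiff : ∀ c : Int, (c ∈ axis ∧ (c ≤ x ∧ bLinked axis x c = true)) ↔ (x - d + 1 ≤ c ∧ c ≤ x) := by
    intro c
    constructor
    · rintro ⟨hmem, hcx, hlk⟩
      refine ⟨?_, hcx⟩
      by_contra hgt
      have : x - (d : Int) ∈ axis := by
        refine (linked_iff axis x c).mp hlk _ ?_ ?_ <;> omega
      exact hd2 this
    · rintro ⟨h1, h2⟩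
      have hcm : c ∈ axis := by
        have := hd1 (x - c).toNat (by omega)
        rwa [show x - ((x - c).toNat : Int) = c by omega] at this
      refine ⟨hcm, h2, (linked_iff axis x c).mpr ?_⟩
      intro k hk1 hk2
      have := hd1 (x - k).toNat (by omega)
      rwa [show x - ((x - k).toNat : Int) = k by omega] at this
  have hfeq : (axis.filter (fun c => decide (c ≤ x ∧ bLinked axis x c = true))).toFinset
      = Finset.Icc (x - d + 1) x := by
    ext c
    simp only [List.mem_toFinset, List.mem_filter, decide_eq_true_eq, Finset.mem_Icc]
    exact hiff c
  have hlen : (axis.filter (fun c => decide (c ≤ x ∧ bLinked axis x c = true))).length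
      = (Finset.Icc (x - (d:Int) + 1) x).card := by
    rw [← hfeq, List.toFinset_card_of_nodup (hnd.filter _)]
  rw [List.countP_eq_length_filter, hlen, Int.card_Icc]
  omega

-- A's vertical up-walk stops after exactly the upward run
theorem aVerUp_run (fine : List (String × Int)) (s : String) (u : Nat) :
    ∀ (fuel : Nat) (num size : Int),
      (∀ k : Nat, k < u → (s, num + k) ∈ fine) → (s, num + u) ∉ fine → u ≤ fuel →
      aVerUp fine s fuel num size = size + u := by
  induction u with
  | zero =>
    intro fuel num size _ h2 _
    have h2' : (s, num) ∉ fine := by simpa using h2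
    cases fuel <;> simp [aVerUp, h2']
  | succ u ih =>
    intro fuel num size h1 h2 hf
    obtain ⟨f, rfl⟩ : ∃ f, fuel = f + 1 := ⟨fuel - 1, by omega⟩
    have h0 : (s, num) ∈ fine := by simpa using h1 0 (by omega)
    rw [aVerUp, if_pos h0, ih f (num + 1) (size + 1)
      (fun k hk => by simpa [add_assoc, add_comm, add_left_comm] using h1 (k + 1) (by omega))
      (by simpa [add_assoc, add_comm, add_left_comm] using h2) (by omega)]
    push_cast; ring

theorem aVerDown_run (fine : List (String × Int)) (s : String) (d : Nat) :
    ∀ (fuel : Nat) (num size : Int),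
      (∀ k : Nat, k < d → (s, num - k) ∈ fine) → (s, num - d) ∉ fine → d ≤ fuel →
      aVerDown fine s fuel num size = size + d := by
  induction d with
  | zero =>
    intro fuel num size _ h2 _
    have h2' : (s, num) ∉ fine := by simpa using h2
    cases fuel <;> simp [aVerDown, h2']
  | succ d ih =>
    intro fuel num size h1 h2 hf
    obtain ⟨f, rfl⟩ : ∃ f, fuel = f + 1 := ⟨fuel - 1, by omega⟩
    have h0 : (s, num) ∈ fine := by simpa using h1 0 (by omega)
    rw [aVerDown, if_pos h0, ih f (num - 1) (size + 1)
      (fun k hk => by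
        have := h1 (k + 1) (by omega)
        push_cast at this
        rwa [show num - ((k:Int) + 1) = num - 1 - k by ring] at this)
      (by
        have h2' := h2
        push_cast at h2'
        rwa [show num - ((d:Int) + 1) = num - 1 - d by ring] at h2')
      (by omega)]
    push_cast; ring

-- A's horizontal up-walk over alphabet indices
theorem aHorUp_run (fine : List (String × Int)) (col : Int) (u : Nat) :
    ∀ (fuel : Nat) (i size : Int), 0 ≤ i → i + u < 26 →
      (∀ k : Nat, k < u → (pvLetter (i + k), col) ∈ fine) →
      (pvLetter (i + u), col) ∉ fine → u ≤ fuel →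
      aHorUp fine col fuel (pvLetter i) size = size + u := by
  induction u with
  | zero =>
    intro fuel i size _ _ _ h2 _
    have h2' : (pvLetter i, col) ∉ fine := by simpa using h2
    cases fuel <;> simp [aHorUp, h2']
  | succ u ih =>
    intro fuel i size h0i h26 h1 h2 hf
    obtain ⟨f, rfl⟩ : ∃ f, fuel = f + 1 := ⟨fuel - 1, by omega⟩
    have h0 : (pvLetter i, col) ∈ fine := by simpa using h1 0 (by omega)
    rw [aHorUp, if_pos h0, find_pvLetter i h0i (by omega)]
    rw [ih f (i + 1) (size + 1) (by omega) (by omega)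
      (fun k hk => by
        have := h1 (k + 1) (by omega)
        push_cast at this
        rwa [show i + ((k:Int) + 1) = i + 1 + k by ring] at this)
      (by
        have h2' := h2
        push_cast at h2'
        rwa [show i + ((u:Int) + 1) = i + 1 + u by ring] at h2')
      (by omega)]
    push_cast; ring

-- A's horizontal down-walk, stopping before 'A'
theorem aHorDown_run (fine : List (String × Int)) (col : Int) (d : Nat) :
    ∀ (fuel : Nat) (i size : Int), 0 ≤ i - d → i < 26 →
      (∀ k : Nat, k < d → (pvLetter (i - k), col) ∈ fine) →
      (pvLetter (i - d), col) ∉ fine → d ≤ fuel →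
      aHorDown fine col fuel (pvLetter i) size = size + d := by
  induction d with
  | zero =>
    intro fuel i size _ _ _ h2 _
    have h2' : (pvLetter i, col) ∉ fine := by simpa using h2
    cases fuel <;> simp [aHorDown, h2']
  | succ d ih =>
    intro fuel i size h0i h26 h1 h2 hf
    obtain ⟨f, rfl⟩ : ∃ f, fuel = f + 1 := ⟨fuel - 1, by omega⟩
    have h0 : (pvLetter i, col) ∈ fine := by simpa using h1 0 (by omega)
    rw [aHorDown, if_pos h0, find_pvLetter i (by push_cast at h0i; omega) (by omega)]
    rw [ih f (i - 1) (size + 1) (by push_cast at h0i ⊢; omega) (by omega)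
      (fun k hk => by
        have := h1 (k + 1) (by omega)
        push_cast at this
        rwa [show i - ((k:Int) + 1) = i - 1 - k by ring] at this)
      (by
        have h2' := h2
        push_cast at h2'
        rwa [show i - ((d:Int) + 1) = i - 1 - d by ring] at h2')
      (by omega)]
    push_cast; ring

-- A's horizontal down-walk descending through row 'A' and stopping at absent 'Z'
theorem aHorDown_wrap (fine : List (String × Int)) (col : Int) :
    ∀ (n fuel : Nat) (size : Int), n < 26 →
      (∀ k : Nat, k ≤ n → (pvLetter k, col) ∈ fine) →
      (pvLetter 25, col) ∉ fine →
      aHorDown fine col (fuel + n + 2) (pvLetter n) size = size + n + 1 := by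
  intro n
  induction n with
  | zero =>
    intro fuel size _ h1 h2
    have h0 : (pvLetter 0, col) ∈ fine := by simpa using h1 0 (by omega)
    show aHorDown fine col (fuel + 2) (pvLetter 0) size = size + 0 + 1
    rw [show fuel + 2 = (fuel + 1) + 1 by omega, aHorDown, if_pos h0]
    rw [find_pvLetter 0 (by omega) (by omega)]
    have hz : pvLetter (0 - 1) = pvLetter 25 := by decide
    rw [hz, aHorDown, if_neg h2]
    omega
  | succ n ih =>
    intro fuel size h26 h1 h2
    have h0 : (pvLetter (n + 1), col) ∈ fine := by simpa using h1 (n + 1) (by omega)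
    rw [show fuel + (n + 1) + 2 = (fuel + n + 2) + 1 by omega, aHorDown]
    rw [if_pos (by exact_mod_cast h0)]
    rw [show ((n + 1 : Nat) : Int) = (n : Int) + 1 by push_cast; ring,
        find_pvLetter ((n:Int) + 1) (by omega) (by omega)]
    rw [show ((n:Int) + 1 - 1 : Int) = ((n : Nat) : Int) by ring]
    rw [ih fuel (size + 1) (by omega) (fun k hk => h1 k (by omega)) h2]
    push_cast; ring

-- A's horizontal down-walk descending through row 'A' and CONTINUING at occupied 'Z'
theorem aHorDown_descend (fine : List (String × Int)) (col : Int) :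
    ∀ (n fuel : Nat) (size : Int), n < 26 →
      (∀ k : Nat, k ≤ n → (pvLetter k, col) ∈ fine) →
      aHorDown fine col (fuel + n + 1) (pvLetter n) size
        = aHorDown fine col fuel (pvLetter 25) (size + n + 1) := by
  intro n
  induction n with
  | zero =>
    intro fuel size _ h1
    have h0 : (pvLetter 0, col) ∈ fine := by simpa using h1 0 (by omega)
    simp only [Nat.cast_zero]
    rw [show fuel + 0 + 1 = fuel + 1 by omega, aHorDown, if_pos h0]
    rw [find_pvLetter 0 (by omega) (by omega)]
    have hz : pvLetter (0 - 1) = pvLetter 25 := by decide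
    rw [hz]
    congr 1
    push_cast; ring
  | succ n ih =>
    intro fuel size h26 h1
    have h0 : (pvLetter (n + 1), col) ∈ fine := by simpa using h1 (n + 1) (by omega)
    rw [show fuel + (n + 1) + 1 = (fuel + n + 1) + 1 by omega, aHorDown]
    rw [if_pos (by exact_mod_cast h0)]
    rw [show ((n + 1 : Nat) : Int) = (n : Int) + 1 by push_cast; ring,
        find_pvLetter ((n:Int) + 1) (by omega) (by omega)]
    rw [show ((n:Int) + 1 - 1 : Int) = ((n : Nat) : Int) by ring]
    rw [ih fuel (size + 1) (by omega) (fun k hk => h1 k (by omega))]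
    congr 1
    push_cast; ring

-- monotonicity, for the tightness theorem
theorem aHorUp_ge (fine : List (String × Int)) (col : Int) :
    ∀ (fuel : Nat) (num : String) (size : Int), size ≤ aHorUp fine col fuel num size := by
  intro fuel
  induction fuel with
  | zero => intro num size; simp [aHorUp]
  | succ f ih =>
    intro num size
    rw [aHorUp]
    split
    · exact le_trans (by omega) (ih _ (size + 1))
    · omega

theorem aHorDown_ge (fine : List (String × Int)) (col : Int) :
    ∀ (fuel : Nat) (num : String) (size : Int), size ≤ aHorDown fine col fuel num size := by
  intro fuel
  induction fuel with
  | zero => intro num size; simp [aHorDown]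
  | succ f ih =>
    intro num size
    rw [aHorDown]
    split
    · exact le_trans (by omega) (ih _ (size + 1))
    · omega


theorem bTail_eq (axis : List Int) (x : Int) : bTail axis x =
    axis.foldl (fun n c => if x ≤ c ∧ bLinked axis x c = true then n + 1 else n) (0 : Int) +
    axis.foldl (fun n c => if c ≤ x ∧ bLinked axis x c = true then n + 1 else n) (0 : Int) - 1 := rfl

-- ===== VERDICT (by name: the statement is the Claim_ definition above) =====
theorem ship_size_spec : Claim_unchanged_ship_size := by
  intro data coords hdom hpre
  unfold Spec_ship_size
  intro hnD
  unfold Pre_ship_size at hpre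
  unfold D_ship_size at hnD
  unfold ship_size ship_size_alt
  simp only [] at hpre hnD ⊢
  set letter := coords.1 with hlet
  set col := coords.2 with hcol
  set stars := (PySem.List.pyGet? data 0).getD [] ++ (PySem.List.pyGet? data 1).getD [] with hstars
  set fine := stars.foldl
    (fun acc star => if star.1 = letter ∨ star.2 = col then acc ++ [star] else acc)
    ([] : List (String × Int)) with hfine
  set occ := PySem.Set.ofList stars with hocc
  have hmv : ∀ c : Int, ((letter, c) ∈ fine ↔ (letter, c) ∈ stars) := fun c =>
    mem_fine_iff stars letter col (letter, c) (Or.inl rfl)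
  have hmh : ∀ t : String, ((t, col) ∈ fine ↔ (t, col) ∈ stars) := fun t =>
    mem_fine_iff stars letter col (t, col) (Or.inr rfl)
  have hmo : ∀ q : String × Int, (q ∈ occ ↔ q ∈ stars) := fun q => PySem.Set.mem_ofList _ _
  by_cases hc : (letter, col + 1) ∈ stars ∨ (letter, col - 1) ∈ stars
  · -- vertical
    have hcf : (letter, col + 1) ∈ fine ∨ (letter, col - 1) ∈ fine := by
      rcases hc with h | h
      · exact Or.inl ((hmv _).mpr h)
      · exact Or.inr ((hmv _).mpr h)
    have hco : (letter, col + 1) ∈ occ ∨ (letter, col - 1) ∈ occ := by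
      rcases hc with h | h
      · exact Or.inl ((hmo _).mpr h)
      · exact Or.inr ((hmo _).mpr h)
    rw [if_pos hcf, if_pos hco]
    set axisV := PySem.Set.ofList ((occ.filter (fun rc => rc.1 == letter)).map (fun rc => rc.2)) with haxv
    have haV : ∀ c : Int, (c ∈ axisV ↔ (letter, c) ∈ stars) := fun c => mem_axisV stars letter c
    have hndV : axisV.Nodup := PySem.Set.nodup_ofList _
    have hlenV : axisV.length ≤ stars.length := by
      calc axisV.length ≤ ((occ.filter (fun rc => rc.1 == letter)).map (fun rc => rc.2)).length :=
            PySem.Set.length_ofList_le _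
        _ = (occ.filter (fun rc => rc.1 == letter)).length := by simp
        _ ≤ occ.length := List.length_filter_le _ _
        _ ≤ stars.length := PySem.Set.length_ofList_le _
    have hPU : ∃ k : Nat, col + (k : Int) ∉ axisV := by
      obtain ⟨k, _, hk⟩ := exists_shift_not_mem axisV (fun k => col + (k : Int))
        (fun a b h => by simp only [] at h; omega)
      exact ⟨k, hk⟩
    have hPD : ∃ k : Nat, col - (k : Int) ∉ axisV := by
      obtain ⟨k, _, hk⟩ := exists_shift_not_mem axisV (fun k => col - (k : Int))
        (fun a b h => by simp only [] at h; omega)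
      exact ⟨k, hk⟩
    set u := Nat.find hPU with hu
    set d := Nat.find hPD with hd
    have hu2 : col + (u : Int) ∉ axisV := Nat.find_spec hPU
    have hu1 : ∀ m : Nat, m < u → col + (m : Int) ∈ axisV := fun m hm => by
      have := Nat.find_min hPU hm; simpa using this
    have hd2 : col - (d : Int) ∉ axisV := Nat.find_spec hPD
    have hd1 : ∀ m : Nat, m < d → col - (m : Int) ∈ axisV := fun m hm => by
      have := Nat.find_min hPD hm; simpa using this
    have hub : u ≤ stars.length := by
      obtain ⟨k, hkl, hk⟩ := exists_shift_not_mem axisV (fun k => col + (k : Int))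
        (fun a b h => by simp only [] at h; omega)
      exact le_trans (Nat.find_min' hPU hk) (le_trans hkl hlenV)
    have hdb : d ≤ stars.length := by
      obtain ⟨k, hkl, hk⟩ := exists_shift_not_mem axisV (fun k => col - (k : Int))
        (fun a b h => by simp only [] at h; omega)
      exact le_trans (Nat.find_min' hPD hk) (le_trans hkl hlenV)
    rw [aVerUp_run fine letter u (stars.length + 60) col 1
      (fun k hk => (hmv _).mpr ((haV _).mp (hu1 k hk)))
      (fun h => hu2 ((haV _).mpr ((hmv _).mp h))) (by omega)]
    rw [aVerDown_run fine letter d (stars.length + 60) col (1 + u)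
      (fun k hk => (hmv _).mpr ((haV _).mp (hd1 k hk)))
      (fun h => hd2 ((haV _).mpr ((hmv _).mp h))) (by omega)]
    rw [bTail_eq, count_above axisV hndV col u hu1 hu2, count_below axisV hndV col d hd1 hd2]
    ring
  · -- horizontal
    have hcf : ¬ ((letter, col + 1) ∈ fine ∨ (letter, col - 1) ∈ fine) := by
      intro h; rcases h with h | h
      · exact hc (Or.inl ((hmv _).mp h))
      · exact hc (Or.inr ((hmv _).mp h))
    have hco : ¬ ((letter, col + 1) ∈ occ ∨ (letter, col - 1) ∈ occ) := by
      intro h; rcases h with h | h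
      · exact hc (Or.inl ((hmo _).mp h))
      · exact hc (Or.inr ((hmo _).mp h))
    rw [if_neg hcf, if_neg hco]
    set axisH := PySem.Set.ofList (occ.filterMap (fun rc =>
      if rc.2 = col ∧ rc.1 ∈ bBoard then some (PySem.Str.find pvAlphabet rc.1) else none)) with haxh
    have haH : ∀ j : Int, (j ∈ axisH ↔ 0 ≤ j ∧ j < 26 ∧ (pvLetter j, col) ∈ stars) := fun j =>
      mem_axisH stars col j
    have hndH : axisH.Nodup := PySem.Set.nodup_ofList _
    obtain ⟨F, hF⟩ : ∃ F : Nat, stars.length + 60 = F + 1 := ⟨stars.length + 59, by omega⟩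
    by_cases hcen : (letter, col) ∈ stars
    · -- centre occupied: Pre_ supplies find ≥ 0 and a gap above; ¬D_ supplies len = 1 and no wrap
      obtain ⟨hlen2, hdisj⟩ := hpre
      have hgap : 0 ≤ PySem.Str.find pvAlphabet letter ∧
          ∃ j ∈ List.range 26, PySem.Str.find pvAlphabet letter < (j : Int) ∧
            (pvLetter (j : Int), col) ∉ stars := by
        rcases hdisj with h | h | h
        · exact absurd h hc
        · exact absurd hcen h
        · exact h
      obtain ⟨hfind0, j, hjr, hjlt, hjnot⟩ := hgap
      have hj26 : (j : Int) < 26 := by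
        have := List.mem_range.mp hjr; exact_mod_cast this
      have hlen1 : PySem.Str.len letter = 1 := by
        by_contra hne
        exact hnD ⟨hc, hfind0, Or.inl ⟨hne, hcen⟩⟩
      obtain ⟨hflt, hlpv⟩ := eq_pvLetter_of_len_one letter hlen1 hfind0
      set i := PySem.Str.find pvAlphabet letter with hi
      have hbb : letter ∈ bBoard := by
        rw [mem_bBoard_iff]
        exact ⟨i.toNat, by omega, by rw [hlpv]; congr 1; omega⟩
      rw [if_pos hbb]
      -- up run
      have hPU : ∃ k : Nat, i + (k : Int) ∉ axisH :=
        ⟨(j - i).toNat, by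
          rw [show i + (((j - i).toNat : Nat) : Int) = (j : Int) by omega, haH]
          rintro ⟨-, -, hmem⟩; exact hjnot hmem⟩
      set u := Nat.find hPU with hu
      have hu2 : i + (u : Int) ∉ axisH := Nat.find_spec hPU
      have hu1 : ∀ m : Nat, m < u → i + (m : Int) ∈ axisH := fun m hm => by
        have := Nat.find_min hPU hm; simpa using this
      have hub : (i : Int) + u ≤ j := by
        have := Nat.find_min' hPU (by
          rw [show i + (((j - i).toNat : Nat) : Int) = (j : Int) by omega, haH]
          rintro ⟨-, -, hmem⟩; exact hjnot hmem)
        omega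
      -- down run
      have hPD : ∃ k : Nat, i - (k : Int) ∉ axisH :=
        ⟨(i + 1).toNat, by
          rw [show i - (((i + 1).toNat : Nat) : Int) = (-1 : Int) by omega, haH]
          rintro ⟨h0, -, -⟩; omega⟩
      set d := Nat.find hPD with hd
      have hd2 : i - (d : Int) ∉ axisH := Nat.find_spec hPD
      have hd1 : ∀ m : Nat, m < d → i - (m : Int) ∈ axisH := fun m hm => by
        have := Nat.find_min hPD hm; simpa using this
      have hdbI : (d : Int) ≤ i + 1 := by
        have := Nat.find_min' hPD (by
          rw [show i - (((i + 1).toNat : Nat) : Int) = (-1 : Int) by omega, haH]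
          rintro ⟨h0, -, -⟩; omega)
        omega
      -- A's up walk
      have hup : aHorUp fine col (stars.length + 60) letter 1 = 1 + u := by
        rw [hlpv]
        exact aHorUp_run fine col u (stars.length + 60) i 1 hfind0 (by omega)
          (fun k hk => (hmh _).mpr (((haH _).mp (hu1 k hk)).2.2))
          (fun h => hu2 ((haH _).mpr ⟨by omega, by omega, (hmh _).mp h⟩)) (by omega)
      rw [hup]
      -- A's down walk
      have hdown : aHorDown fine col (stars.length + 60) letter (1 + u) = 1 + u + d := by
        rw [hlpv]
        by_cases hdle : (d : Int) ≤ i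
        · exact aHorDown_run fine col d (stars.length + 60) i (1 + u) (by omega) (by omega)
            (fun k hk => (hmh _).mpr (((haH _).mp (hd1 k hk)).2.2))
            (fun h => hd2 ((haH _).mpr ⟨by omega, by omega, (hmh _).mp h⟩)) (by omega)
        · -- wrap: every index 0..i occupied, and ¬D_ forces 'Z' absent
          have hdeq : (d : Int) = i + 1 := by omega
          have hall : ∀ k : Nat, (k : Int) ≤ i → ((k : Int) ∈ axisH) := by
            intro k hk
            have hm : (i - k).toNat < d := by omega
            have := hd1 (i - k).toNat hm
            rwa [show i - (((i - (k : Int)).toNat : Nat) : Int) = (k : Int) by omega] at this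
          have h25 : (pvLetter 25, col) ∉ fine := by
            intro hfz
            refine hnD ⟨hc, hfind0, Or.inr ⟨hlen1, ?_, (hmh _).mp hfz⟩⟩
            intro k hkr hki
            exact ((haH _).mp (hall k hki)).2.2
          obtain ⟨f', hf'⟩ : ∃ f' : Nat, stars.length + 60 = f' + i.toNat + 2 :=
            ⟨stars.length + 60 - i.toNat - 2, by omega⟩
          rw [hf', show pvLetter i = pvLetter ((i.toNat : Nat) : Int) by congr 1; omega]
          rw [aHorDown_wrap fine col i.toNat f' (1 + u) (by omega)
            (fun k hk => (hmh _).mpr (((haH _).mp (hall k (by omega))).2.2)) h25]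
          omega
      rw [hdown]
      rw [bTail_eq, count_above axisH hndH i u hu1 hu2, count_below axisH hndH i d hd1 hd2]
      ring
    · -- centre not occupied: both sides give -1
      have hcenf : (letter, col) ∉ fine := fun h => hcen ((hmh _).mp h)
      have hup1 : aHorUp fine col (stars.length + 60) letter 1 = 1 := by
        rw [hF, aHorUp, if_neg hcenf]
      have hdown1 : aHorDown fine col (stars.length + 60) letter 1 = 1 := by
        rw [hF, aHorDown, if_neg hcenf]
      rw [hup1, hdown1]
      by_cases hbb : letter ∈ bBoard
      · rw [if_pos hbb]
        obtain ⟨kb, hkb26, hkbe⟩ := (mem_bBoard_iff letter).mp hbb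
        have hfi : PySem.Str.find pvAlphabet letter = (kb : Int) := by
          rw [hkbe]; exact find_pvLetter kb (by omega) (by exact_mod_cast hkb26)
        have hnotax : ∀ m : Nat, (m : Int) = 0 → PySem.Str.find pvAlphabet letter + (0:Int) ∉ axisH := by
          intro m hm
          rw [add_zero, hfi, haH]
          rintro ⟨-, -, hmem⟩
          rw [← hkbe] at hmem
          exact hcen hmem
        have hzero : PySem.Str.find pvAlphabet letter + ((0 : Nat) : Int) ∉ axisH := by
          simpa using hnotax 0 rfl
        have hzero' : PySem.Str.find pvAlphabet letter - ((0 : Nat) : Int) ∉ axisH := by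
          simpa using hnotax 0 rfl
        rw [bTail_eq,
          count_above axisH hndH (PySem.Str.find pvAlphabet letter) 0 (fun k hk => by omega) hzero,
          count_below axisH hndH (PySem.Str.find pvAlphabet letter) 0 (fun k hk => by omega) hzero']
        ring
      · rw [if_neg hbb]
        ring

theorem ship_size_changed : Claim_changed_ship_size := by
  unfold Claim_changed_ship_size; decide

theorem ship_size_tight : Claim_exact_ship_size := by
  intro data coords hdom hpre hD
  unfold Pre_ship_size at hpre
  unfold D_ship_size at hD
  unfold ship_size ship_size_alt
  simp only [] at hpre hD ⊢
  set letter := coords.1 with hlet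
  set col := coords.2 with hcol
  set stars := (PySem.List.pyGet? data 0).getD [] ++ (PySem.List.pyGet? data 1).getD [] with hstars
  set fine := stars.foldl
    (fun acc star => if star.1 = letter ∨ star.2 = col then acc ++ [star] else acc)
    ([] : List (String × Int)) with hfine
  set occ := PySem.Set.ofList stars with hocc
  have hmv : ∀ c : Int, ((letter, c) ∈ fine ↔ (letter, c) ∈ stars) := fun c =>
    mem_fine_iff stars letter col (letter, c) (Or.inl rfl)
  have hmh : ∀ t : String, ((t, col) ∈ fine ↔ (t, col) ∈ stars) := fun t =>
    mem_fine_iff stars letter col (t, col) (Or.inr rfl)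
  have hmo : ∀ q : String × Int, (q ∈ occ ↔ q ∈ stars) := fun q => PySem.Set.mem_ofList _ _
  obtain ⟨hc, hfind0, hp⟩ := hD
  have hcf : ¬ ((letter, col + 1) ∈ fine ∨ (letter, col - 1) ∈ fine) := by
    intro h; rcases h with h | h
    · exact hc (Or.inl ((hmv _).mp h))
    · exact hc (Or.inr ((hmv _).mp h))
  have hco : ¬ ((letter, col + 1) ∈ occ ∨ (letter, col - 1) ∈ occ) := by
    intro h; rcases h with h | h
    · exact hc (Or.inl ((hmo _).mp h))
    · exact hc (Or.inr ((hmo _).mp h))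
  rw [if_neg hcf, if_neg hco]
  set axisH := PySem.Set.ofList (occ.filterMap (fun rc =>
    if rc.2 = col ∧ rc.1 ∈ bBoard then some (PySem.Str.find pvAlphabet rc.1) else none)) with haxh
  have haH : ∀ j : Int, (j ∈ axisH ↔ 0 ≤ j ∧ j < 26 ∧ (pvLetter j, col) ∈ stars) := fun j =>
    mem_axisH stars col j
  have hndH : axisH.Nodup := PySem.Set.nodup_ofList _
  obtain ⟨F, hF⟩ : ∃ F : Nat, stars.length + 60 = F + 1 := ⟨stars.length + 59, by omega⟩
  rcases hp with ⟨hlenne, hcen⟩ | ⟨hlen1, hall, h25⟩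
  · -- substring row label: A counts at least one cell, B answers -1
    have hbb : letter ∉ bBoard := by
      intro hbb
      obtain ⟨k, hk, hkeq⟩ := (mem_bBoard_iff letter).mp hbb
      rw [hkeq] at hlenne
      exact hlenne (len_pvLetter k (by omega) (by exact_mod_cast hk))
    rw [if_neg hbb, hF]
    have hcenf : (letter, col) ∈ fine := (hmh _).mpr hcen
    have h1 : 2 ≤ aHorUp fine col (F + 1) letter 1 := by
      rw [aHorUp, if_pos hcenf]
      exact aHorUp_ge fine col F _ 2
    rw [aHorDown, if_pos hcenf]
    have h2 := aHorDown_ge fine col F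
      (pvLetter (PySem.Str.find pvAlphabet letter - 1)) (aHorUp fine col (F + 1) letter 1 + 1)
    intro heq
    omega
  · -- wraparound: A counts the run ending at 'Z' as well
    obtain ⟨hflt, hlpv⟩ := eq_pvLetter_of_len_one letter hlen1 hfind0
    set i := PySem.Str.find pvAlphabet letter with hi
    have hallAx : ∀ k : Nat, (k : Int) ≤ i → ((k : Int) ∈ axisH) := by
      intro k hk
      refine (haH _).mpr ⟨by omega, by omega, ?_⟩
      exact hall k (List.mem_range.mpr (by omega)) hk
    have hcen : (letter, col) ∈ stars := by
      have := hall i.toNat (List.mem_range.mpr (by omega)) (by omega)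
      rwa [show ((i.toNat : Nat) : Int) = i by omega, ← hlpv] at this
    have hgap : ∃ j ∈ List.range 26, i < (j : Int) ∧ (pvLetter (j : Int), col) ∉ stars := by
      rcases hpre.2 with h | h | h
      · exact absurd h hc
      · exact absurd hcen h
      · exact h.2
    obtain ⟨j, hjr, hjlt, hjnot⟩ := hgap
    have hj26 : (j : Int) < 26 := by
      have := List.mem_range.mp hjr; exact_mod_cast this
    have hbb : letter ∈ bBoard := by
      rw [mem_bBoard_iff]
      exact ⟨i.toNat, by omega, by rw [hlpv]; congr 1; omega⟩
    rw [if_pos hbb]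
    -- up run
    have hPU : ∃ k : Nat, i + (k : Int) ∉ axisH :=
      ⟨(j - i).toNat, by
        rw [show i + (((j - i).toNat : Nat) : Int) = (j : Int) by omega, haH]
        rintro ⟨-, -, hmem⟩; exact hjnot hmem⟩
    set u := Nat.find hPU with hu
    have hu2 : i + (u : Int) ∉ axisH := Nat.find_spec hPU
    have hu1 : ∀ m : Nat, m < u → i + (m : Int) ∈ axisH := fun m hm => by
      have := Nat.find_min hPU hm; simpa using this
    have hub : (i : Int) + u ≤ j := by
      have := Nat.find_min' hPU (by
        rw [show i + (((j - i).toNat : Nat) : Int) = (j : Int) by omega, haH]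
        rintro ⟨-, -, hmem⟩; exact hjnot hmem)
      omega
    -- B's downward count stops at the board edge
    have hPD : ∃ k : Nat, i - (k : Int) ∉ axisH :=
      ⟨(i + 1).toNat, by
        rw [show i - (((i + 1).toNat : Nat) : Int) = (-1 : Int) by omega, haH]
        rintro ⟨h0, -, -⟩; omega⟩
    set d := Nat.find hPD with hd
    have hd2 : i - (d : Int) ∉ axisH := Nat.find_spec hPD
    have hd1 : ∀ m : Nat, m < d → i - (m : Int) ∈ axisH := fun m hm => by
      have := Nat.find_min hPD hm; simpa using this
    have hdeq : d = i.toNat + 1 := by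
      have hle : d ≤ (i + 1).toNat := Nat.find_min' hPD (by
        rw [show i - (((i + 1).toNat : Nat) : Int) = (-1 : Int) by omega, haH]
        rintro ⟨h0, -, -⟩; omega)
      by_contra hne
      have hlt : d ≤ i.toNat := by omega
      have : i - (d : Int) ∈ axisH := by
        have := hallAx (i - (d:Int)).toNat (by omega)
        rwa [show (((i - (d:Int)).toNat : Nat) : Int) = i - (d : Int) by omega] at this
      exact hd2 this
    -- A's up walk
    have hup : aHorUp fine col (stars.length + 60) letter 1 = 1 + u := by
      rw [hlpv]
      exact aHorUp_run fine col u (stars.length + 60) i 1 hfind0 (by omega)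
        (fun k hk => (hmh _).mpr (((haH _).mp (hu1 k hk)).2.2))
        (fun h => hu2 ((haH _).mpr ⟨by omega, by omega, (hmh _).mp h⟩)) (by omega)
    rw [hup]
    -- A's down walk descends to 'A', wraps to occupied 'Z' and keeps counting
    have h25ax : (25 : Int) ∈ axisH := (haH _).mpr ⟨by omega, by omega, h25⟩
    have hPD' : ∃ k : Nat, (25 : Int) - (k : Int) ∉ axisH :=
      ⟨25 - j, by
        rw [show (25 : Int) - ((25 - j : Nat) : Int) = (j : Int) by omega, haH]
        rintro ⟨-, -, hmem⟩; exact hjnot hmem⟩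
    set d' := Nat.find hPD' with hd'
    have hd'2 : (25 : Int) - (d' : Int) ∉ axisH := Nat.find_spec hPD'
    have hd'1 : ∀ m : Nat, m < d' → (25 : Int) - (m : Int) ∈ axisH := fun m hm => by
      have := Nat.find_min hPD' hm; simpa using this
    have hd'le : (d' : Int) ≤ 25 - j := by
      have := Nat.find_min' hPD' (by
        rw [show (25 : Int) - ((25 - j : Nat) : Int) = (j : Int) by omega, haH]
        rintro ⟨-, -, hmem⟩; exact hjnot hmem)
      omega
    have hd'pos : 1 ≤ d' := by
      rcases Nat.eq_zero_or_pos d' with h0 | h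
      · exfalso; apply hd'2; rw [h0]; simpa using h25ax
      · exact h
    have hdown : aHorDown fine col (stars.length + 60) letter (1 + u)
        = 1 + u + i.toNat + 1 + d' := by
      rw [hlpv]
      obtain ⟨f', hf'⟩ : ∃ f' : Nat, stars.length + 60 = f' + i.toNat + 1 :=
        ⟨stars.length + 60 - i.toNat - 1, by omega⟩
      rw [hf', show pvLetter i = pvLetter ((i.toNat : Nat) : Int) by congr 1; omega]
      rw [aHorDown_descend fine col i.toNat f' (1 + u) (by omega)
        (fun k hk => (hmh _).mpr (((haH _).mp (hallAx k (by omega))).2.2))]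
      rw [aHorDown_run fine col d' f' 25 (1 + u + i.toNat + 1) (by omega) (by omega)
        (fun k hk => (hmh _).mpr (((haH _).mp (hd'1 k hk)).2.2))
        (fun h => hd'2 ((haH _).mpr ⟨by omega, by omega, (hmh _).mp h⟩)) (by omega)]
    rw [hdown]
    rw [bTail_eq, count_above axisH hndH i u hu1 hu2, count_below axisH hndH i d hd1 hd2]
    intro heq
    omega
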